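-- pv_equiv track=rewrite | github.com/rebase-energy/TimeDataModel | timedatamodel/_repr.py | _bin_coverage
-- ===== SOURCE A (Python) =====
-- def _bin_coverage(mask: list[bool], n_bins: int) -> list[bool]:
--     n = len(mask)
--     if n == 0:
--         return [False] * n_bins
--     actual_bins = min(n_bins, n)
--     bins: list[bool] = []
--     for i in range(actual_bins):
--         lo = i * n // actual_bins
--         hi = (i + 1) * n // actual_bins
--         bins.append(any(mask[lo:hi]))
--     return bins
-- ===== SOURCE B (Python) =====
-- def _bin_coverage(mask: list[bool], n_bins: int) -> list[bool]:
--     n = len(mask)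
--     if n == 0:
--         return [False] * n_bins
--     actual_bins = min(n_bins, n)
--     if actual_bins <= 0:
--         return []
--     result = [False] * actual_bins
--     for j, val in enumerate(mask):
--         if val:
--             result[((j + 1) * actual_bins - 1) // n] = True
--     return result
-- ===== Notes on version B (the rewrite author's own statement) =====
-- stated objective: alternative
-- what changed: Instead of gathering per-bin slices (one pass per bin with any() over mask[lo:hi]), B makes a single element-wise pass over the mask and scatters each True element into its bin via the index formula ((j+1)*actual_bins-1)//n.
import Mathlib
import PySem

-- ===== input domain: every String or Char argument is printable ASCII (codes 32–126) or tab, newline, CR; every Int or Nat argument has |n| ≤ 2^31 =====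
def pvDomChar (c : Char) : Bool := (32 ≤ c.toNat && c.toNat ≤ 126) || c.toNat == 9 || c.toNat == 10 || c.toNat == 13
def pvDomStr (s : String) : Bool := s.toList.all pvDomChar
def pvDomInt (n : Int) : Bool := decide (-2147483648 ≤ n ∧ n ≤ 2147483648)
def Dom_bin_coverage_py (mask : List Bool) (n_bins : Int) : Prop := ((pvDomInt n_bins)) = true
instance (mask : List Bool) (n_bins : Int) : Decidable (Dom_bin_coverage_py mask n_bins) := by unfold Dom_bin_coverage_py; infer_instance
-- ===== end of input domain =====

-- B replaces A's per-bin slice gathering by a single element-wise scatter pass; objective: alternative decomposition, same cost.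

-- ===== PORT A =====
def bin_coverage_py (mask : List Bool) (n_bins : Int) : List Bool :=
  let n : Int := mask.length
  if n = 0 then PySem.List.pyRepeat [false] n_bins
  else
    let actual_bins := min n_bins n
    (PySem.List.pyRange 0 actual_bins 1).foldl (fun bins i =>
      let lo := PySem.Int.floordiv (i * n) actual_bins
      let hi := PySem.Int.floordiv ((i + 1) * n) actual_bins
      bins ++ [(PySem.List.slice mask (some lo) (some hi)).any id]) []

-- ===== PORT B =====
-- pySetD is exact for B's `result[idx] = True`: in B's loop 0 ≤ idx < actual_bins = len(result), so Python never raises there.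
def bin_coverage_py_alt (mask : List Bool) (n_bins : Int) : List Bool :=
  let n : Int := mask.length
  if n = 0 then PySem.List.pyRepeat [false] n_bins
  else
    let actual_bins := min n_bins n
    if actual_bins ≤ 0 then []
    else
      (PySem.List.enumerate mask 0).foldl (fun result jv =>
        if jv.2 then
          PySem.List.pySetD result (PySem.Int.floordiv ((jv.1 + 1) * actual_bins - 1) n) true
        else result) (PySem.List.pyRepeat [false] actual_bins)

-- ===== PRECONDITION & SPEC =====
def Spec_bin_coverage_py (mask : List Bool) (n_bins : Int) (out : List Bool) : Prop := out = bin_coverage_py_alt mask n_bins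
instance (mask : List Bool) (n_bins : Int) (out : List Bool) : Decidable (Spec_bin_coverage_py mask n_bins out) := by unfold Spec_bin_coverage_py; infer_instance

-- ===== CLAIM (what is proved, stated in full; the proofs are below) =====
def Claim_equal_bin_coverage_py : Prop := ∀ (mask : List Bool) (n_bins : Int), Dom_bin_coverage_py mask n_bins → Spec_bin_coverage_py mask n_bins (bin_coverage_py mask n_bins)

-- ===== LEMMAS AND PROOFS =====

-- B's bin index of element j, in Nat form (bn = actual_bins, nn = len(mask)).
def pvBin (bn nn j : Nat) : Nat := ((j + 1) * bn - 1) / nn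

-- pending scatter contribution of the remaining elements l (absolute start index k) to bin i
def pvPend (bn nn : Nat) (l : List Bool) (k i : Nat) : Bool :=
  match l with
  | [] => false
  | v :: t => (v && (pvBin bn nn k == i)) || pvPend bn nn t (k + 1) i

lemma pvDivEq (x n i : Nat) (hn : 0 < n) : x / n = i ↔ n * i ≤ x ∧ x < n * (i + 1) := by
  have e1 : n * i = i * n := by ring
  have e3 : (i + 1) * n = i * n + n := by ring
  have e4 : n * (i + 1) = i * n + n := by ring
  constructor
  · rintro rfl
    exact ⟨Nat.mul_div_le x n |>.trans_eq rfl, Nat.lt_mul_div_succ x hn⟩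
  · rintro ⟨h1, h2⟩
    exact Nat.div_eq_of_lt_le (by omega) (by rw [Nat.succ_mul]; omega)

-- the key index arithmetic: B's scatter formula inverts A's floor-based slice boundaries
lemma pvBin_eq_iff (bn nn i j : Nat) (hb : 0 < bn) (hn : 0 < nn) :
    pvBin bn nn j = i ↔ i * nn / bn ≤ j ∧ j < (i + 1) * nn / bn := by
  have h1 : i * nn / bn ≤ j ↔ i * nn ≤ bn * j + (bn - 1) := Nat.div_le_iff_le_mul_add_pred hb
  have h2 : j + 1 ≤ (i + 1) * nn / bn ↔ (j + 1) * bn ≤ (i + 1) * nn := Nat.le_div_iff_mul_le hb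
  have h3 := pvDivEq ((j + 1) * bn - 1) nn i hn
  have e1 : (j + 1) * bn = bn * j + bn := by ring
  have e2 : (i + 1) * nn = i * nn + nn := by ring
  have e3 : nn * i = i * nn := by ring
  have e4 : nn * (i + 1) = i * nn + nn := by ring
  have hb1 : 1 ≤ (j + 1) * bn := Nat.one_le_iff_ne_zero.2 (by positivity)
  unfold pvBin
  omega

lemma pvScatter (bn nn : Nat) (hb : 0 < bn) (l : List Bool) :
    ∀ (k : Nat) (r : List Bool),
      ((PySem.List.enumerate l (k : Int)).foldl (fun result jv =>
          if jv.2 = true then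
            PySem.List.pySetD result (PySem.Int.floordiv ((jv.1 + 1) * (bn : Int) - 1) (nn : Int)) true
          else result) r).length = r.length ∧
      ∀ i (h : i < r.length) (h2 : i < ((PySem.List.enumerate l (k : Int)).foldl (fun result jv =>
          if jv.2 = true then
            PySem.List.pySetD result (PySem.Int.floordiv ((jv.1 + 1) * (bn : Int) - 1) (nn : Int)) true
          else result) r).length),
        ((PySem.List.enumerate l (k : Int)).foldl (fun result jv =>
          if jv.2 = true then
            PySem.List.pySetD result (PySem.Int.floordiv ((jv.1 + 1) * (bn : Int) - 1) (nn : Int)) true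
          else result) r)[i]'h2 = (r[i]'h || pvPend bn nn l k i) := by
  induction l with
  | nil => intro k r; simp [PySem.List.enumerate_nil, pvPend]
  | cons v t ih =>
    intro k r
    have hge : 1 ≤ (k + 1) * bn := Nat.one_le_iff_ne_zero.2 (by positivity)
    have hcast2 : (((k + 1 : Nat) : Int)) * (bn : Int) - 1 = (((k + 1) * bn - 1 : Nat) : Int) := by
      push_cast [hge]; ring
    have hk1 : (k : Int) + 1 = ((k + 1 : Nat) : Int) := by push_cast; ring
    rw [PySem.List.enumerate_cons, List.foldl_cons]
    simp only [hcast2, hk1, PySem.Int.floordiv_natCast, PySem.List.pySetD_natCast]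
    obtain ⟨ihl, ihe⟩ := ih (k + 1) (if v = true then r.set (((k + 1) * bn - 1) / nn) true else r)
    constructor
    · rw [ihl]; cases v <;> simp
    · intro i h h2
      have h' : i < (if v = true then r.set (((k + 1) * bn - 1) / nn) true else r).length := by
        cases v <;> simpa using h
      rw [ihe i h' h2]
      cases v with
      | false => simp [pvPend]
      | true =>
        simp only [pvPend, pvBin, Bool.true_and]
        by_cases hbi : ((k + 1) * bn - 1) / nn = i
        · simp [hbi]
        · have hb2 : (((k + 1) * bn - 1) / nn == i) = false := beq_eq_false_iff_ne.mpr hbi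
          simp [hbi, hb2]

lemma pvPend_eq_true_iff (bn nn : Nat) (l : List Bool) :
    ∀ k i, pvPend bn nn l k i = true ↔
      ∃ j, ∃ h : j < l.length, l[j]'h = true ∧ pvBin bn nn (k + j) = i := by
  induction l with
  | nil => intro k i; simp [pvPend]
  | cons v t ih =>
    intro k i
    simp only [pvPend, Bool.or_eq_true, Bool.and_eq_true, beq_iff_eq, ih]
    constructor
    · rintro (⟨hv, hbin⟩ | ⟨j, hj, hval, hbin⟩)
      · exact ⟨0, by simp, by simpa using hv, by simpa using hbin⟩
      · exact ⟨j + 1, by simpa using hj, by simpa using hval, by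
          have : k + 1 + j = k + (j + 1) := by omega
          rwa [this] at hbin⟩
    · rintro ⟨j, hj, hval, hbin⟩
      cases j with
      | zero => exact Or.inl ⟨by simpa using hval, by simpa using hbin⟩
      | succ j =>
        refine Or.inr ⟨j, by simpa using hj, by simpa using hval, ?_⟩
        have : k + (j + 1) = k + 1 + j := by omega
        rwa [this] at hbin

lemma pvAny_drop_take (l : List Bool) (lo m : Nat) :
    ((l.drop lo).take m).any id = true ↔
      ∃ j, lo ≤ j ∧ j < lo + m ∧ ∃ h : j < l.length, l[j]'h = true := by
  rw [List.any_eq_true]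
  constructor
  · rintro ⟨x, hx, hid⟩
    obtain ⟨p, hp, hget⟩ := List.mem_iff_getElem.1 hx
    have hp' : p < m ∧ lo + p < l.length := by
      simp [List.length_take, List.length_drop] at hp; omega
    refine ⟨lo + p, by omega, by omega, hp'.2, ?_⟩
    have : ((l.drop lo).take m)[p]'hp = l[lo + p]'hp'.2 := by
      rw [List.getElem_take, List.getElem_drop]
    simp only [id] at hid
    rw [this] at hget; rw [hget]; exact hid
  · rintro ⟨j, hlo, hhi, hj, hval⟩
    have hp : j - lo < ((l.drop lo).take m).length := by
      simp [List.length_take, List.length_drop]; omega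
    refine ⟨((l.drop lo).take m)[j - lo]'hp, List.getElem_mem hp, ?_⟩
    have : ((l.drop lo).take m)[j - lo]'hp = l[lo + (j - lo)]'(by omega) := by
      rw [List.getElem_take, List.getElem_drop]
    simp only [id, this]
    have e : lo + (j - lo) = j := by omega
    simp only [e]
    exact hval

-- ===== VERDICT (by name: the statement is the Claim_ definition above) =====
theorem bin_coverage_py_spec : Claim_equal_bin_coverage_py := by
  intro mask n_bins _
  unfold Spec_bin_coverage_py bin_coverage_py bin_coverage_py_alt
  by_cases hm : (mask.length : Int) = 0
  · simp [hm]
  · simp only [if_neg hm]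
    set ab := min n_bins (mask.length : Int) with hab_def
    by_cases hab : ab ≤ 0
    · rw [if_pos hab, PySem.List.pyRange_one_eq_nil hab, List.foldl_nil]
    · rw [if_neg hab]
      rw [not_le] at hab
      set nn := mask.length with hnn_def
      have hn0 : 0 < nn := by by_contra h; apply hm; simp [hnn_def]; omega
      set bn := ab.toNat with hbn_def
      have habn : ab = (bn : Int) := by omega
      have hb0 : 0 < bn := by omega
      have hbnn : bn ≤ nn := by
        have : ab ≤ (nn : Int) := min_le_right _ _
        omega
      -- A side: the per-bin loop is a map over range bn
      have hA : (PySem.List.pyRange 0 ab 1).foldl (fun bins i =>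
            bins ++ [(PySem.List.slice mask (some (PySem.Int.floordiv (i * (nn : Int)) ab))
              (some (PySem.Int.floordiv ((i + 1) * (nn : Int)) ab))).any id]) []
          = (List.range bn).map (fun i =>
              ((mask.drop (i * nn / bn)).take ((i + 1) * nn / bn - i * nn / bn)).any id) := by
        rw [PySem.List.foldl_append_singleton_eq_map, List.nil_append, habn,
            PySem.List.pyRange_one, List.map_map]
        apply List.map_congr_left
        intro k hk
        simp only [Function.comp, zero_add]
        have c1 : ((k : Int)) * (nn : Int) = ((k * nn : Nat) : Int) := by push_cast; ring
        have c2 : ((k : Int) + 1) * (nn : Int) = (((k + 1) * nn : Nat) : Int) := by push_cast; ring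
        rw [c1, c2, PySem.Int.floordiv_natCast, PySem.Int.floordiv_natCast,
            PySem.List.slice_natCast]
      rw [hA]
      -- B side: scatter invariant
      have hrep : PySem.List.pyRepeat [false] ab = List.replicate bn false := by
        rw [PySem.List.pyRepeat_singleton, hbn_def]
      have hB : (PySem.List.enumerate mask (0 : Int)).foldl (fun result jv =>
            if jv.2 = true then
              PySem.List.pySetD result (PySem.Int.floordiv ((jv.1 + 1) * ab - 1) (nn : Int)) true
            else result) (PySem.List.pyRepeat [false] ab)
          = (PySem.List.enumerate mask (0 : Int)).foldl (fun result jv =>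
            if jv.2 = true then
              PySem.List.pySetD result (PySem.Int.floordiv ((jv.1 + 1) * ((bn : Nat) : Int) - 1) (nn : Int)) true
            else result) (List.replicate bn false) := by
        rw [hrep, habn]
      rw [hB]
      obtain ⟨hlen, helem⟩ := pvScatter bn nn hb0 mask 0 (List.replicate bn false)
      simp only [Nat.cast_zero] at hlen helem
      apply List.ext_getElem
      · simp [hlen]
      · intro i h1 h2
        have hi : i < bn := by simpa using h1
        have hi' : i < (List.replicate bn false).length := by simpa using hi
        rw [helem i hi' h2]
        simp only [List.getElem_replicate, Bool.false_or, List.getElem_map, List.getElem_range]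
        have hlohi : i * nn / bn ≤ (i + 1) * nn / bn :=
          Nat.div_le_div_right (by nlinarith)
        rw [Bool.eq_iff_iff, pvAny_drop_take, pvPend_eq_true_iff]
        constructor
        · rintro ⟨j, hlo, hhi, hj, hval⟩
          refine ⟨j, hj, hval, ?_⟩
          rw [Nat.zero_add, pvBin_eq_iff bn nn i j hb0 hn0]
          exact ⟨hlo, by omega⟩
        · rintro ⟨j, hj, hval, hbin⟩
          rw [Nat.zero_add] at hbin
          rw [pvBin_eq_iff bn nn i j hb0 hn0] at hbin
          exact ⟨j, hbin.1, by omega, hj, hval⟩
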